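-- pv_equiv track=rewrite | github.com/idoktz/HotHand | main.py | calc_possessions_change
-- ===== SOURCE A (Python) =====
-- def calc_possessions_change(a, b):
--
-- 	cur_direction = -1
-- 	changes_count = 0
--
-- 	for i in range(min(len(a), len(b))):
-- 		for j in range(2):
-- 			if j == 0:
-- 				if type(a[i]) is int and a[i] > 0:
-- 					if cur_direction == 1:
-- 						cur_direction = 0
-- 						changes_count += 1
-- 					elif cur_direction == -1:
-- 						cur_direction = 0
-- 			else:
-- 				if type(b[i]) is int and b[i] > 0:
-- 					if cur_direction == 0:
-- 						cur_direction = 1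
-- 						changes_count += 1
-- 					elif cur_direction == -1:
-- 						cur_direction = 1
--
-- 	if len(b) > len(a):
-- 		for i in range(len(a), len(b)):
-- 			if type(b[i]) is int and b[i] > 0:
-- 				if cur_direction == 0:
-- 					cur_direction = 1
-- 					changes_count += 1
-- 				elif cur_direction == -1:
-- 					cur_direction = 1
--
-- 	elif len(a) > len(b):
-- 		for i in range(len(b), len(a)):
-- 			if type(a[i]) is int and a[i] > 0:
-- 				if cur_direction == 1:
-- 					cur_direction = 0
-- 					changes_count += 1
-- 				elif cur_direction == -1:
-- 					cur_direction = 0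
--
-- 	return changes_count
-- ===== SOURCE B (Python) =====
-- def calc_possessions_change(a, b):
--     m = min(len(a), len(b))
--     markers = []
--     for i in range(m):
--         if type(a[i]) is int and a[i] > 0:
--             markers.append(0)
--         if type(b[i]) is int and b[i] > 0:
--             markers.append(1)
--     for x in a[m:]:
--         if type(x) is int and x > 0:
--             markers.append(0)
--     for x in b[m:]:
--         if type(x) is int and x > 0:
--             markers.append(1)
--     return sum(1 for p, q in zip(markers, markers[1:]) if p != q)
-- ===== Notes on version B (the rewrite author's own statement) =====
-- stated objective: alternative
-- what changed: B replaces A's inline cur_direction/changes_count state machine (with its duplicated branch logic across the interleaved loop and the two tail loops) by a build-then-count decomposition: it first builds the ordered list of possession-direction markers (0 for a-side, 1 for b-side), then counts adjacent unequal pairs.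
import Mathlib
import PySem

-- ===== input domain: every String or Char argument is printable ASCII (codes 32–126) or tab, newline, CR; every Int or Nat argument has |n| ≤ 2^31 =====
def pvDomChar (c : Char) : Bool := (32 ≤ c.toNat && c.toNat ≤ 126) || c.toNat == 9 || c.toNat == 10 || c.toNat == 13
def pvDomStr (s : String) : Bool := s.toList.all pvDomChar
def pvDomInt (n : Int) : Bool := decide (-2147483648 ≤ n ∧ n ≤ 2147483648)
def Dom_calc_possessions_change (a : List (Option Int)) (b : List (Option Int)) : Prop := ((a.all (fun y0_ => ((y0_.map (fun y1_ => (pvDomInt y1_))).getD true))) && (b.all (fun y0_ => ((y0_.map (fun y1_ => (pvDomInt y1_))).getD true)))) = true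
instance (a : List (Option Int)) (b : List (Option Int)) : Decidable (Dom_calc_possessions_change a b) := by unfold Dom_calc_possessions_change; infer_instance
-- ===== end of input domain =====

-- B replaces A's inline cur_direction/changes_count state machine by a build-then-count
-- decomposition: build the ordered list of possession-direction markers, then count adjacent
-- unequal pairs ('alternative': same cost, different decomposition).

-- ===== PORT A =====
-- 'if type(a[i]) is int and a[i] > 0: if cur == 1: … elif cur == -1: …' (the j == 0 branch; also A's a-tail loop body)
def pvAStep0 (s : Int × Int) (x : Option Int) : Int × Int :=
  match x with
  | some v => if v > 0 then (if s.1 = 1 then (0, s.2 + 1) else if s.1 = -1 then (0, s.2) else s) else s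
  | none => s

-- the j == 1 branch on b[i]; also A's b-tail loop body
def pvAStep1 (s : Int × Int) (x : Option Int) : Int × Int :=
  match x with
  | some v => if v > 0 then (if s.1 = 0 then (1, s.2 + 1) else if s.1 = -1 then (1, s.2) else s) else s
  | none => s

def calc_possessions_change (a : List (Option Int)) (b : List (Option Int)) : Int :=
  let init : Int × Int := (-1, 0)          -- (cur_direction, changes_count)
  let s1 := (PySem.List.pyRange 0 (min (PySem.List.len a) (PySem.List.len b)) 1).foldl
    (fun s i => (PySem.List.pyRange 0 2 1).foldl
      (fun s j => if j = 0 then pvAStep0 s (PySem.List.pyGetD a i none)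
                  else pvAStep1 s (PySem.List.pyGetD b i none)) s) init
  let s2 :=
    if PySem.List.len b > PySem.List.len a then
      (PySem.List.pyRange (PySem.List.len a) (PySem.List.len b) 1).foldl
        (fun s i => pvAStep1 s (PySem.List.pyGetD b i none)) s1
    else if PySem.List.len a > PySem.List.len b then
      (PySem.List.pyRange (PySem.List.len b) (PySem.List.len a) 1).foldl
        (fun s i => pvAStep0 s (PySem.List.pyGetD a i none)) s1
    else s1
  s2.2

-- ===== PORT B =====
-- 'if type(x) is int and x > 0: markers.append(0)'
def pvBApp0 (ms : List Int) (x : Option Int) : List Int :=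
  match x with
  | some v => if v > 0 then ms ++ [(0 : Int)] else ms
  | none => ms

-- 'if type(x) is int and x > 0: markers.append(1)'
def pvBApp1 (ms : List Int) (x : Option Int) : List Int :=
  match x with
  | some v => if v > 0 then ms ++ [(1 : Int)] else ms
  | none => ms

def calc_possessions_change_alt (a : List (Option Int)) (b : List (Option Int)) : Int :=
  let m : Int := min (PySem.List.len a) (PySem.List.len b)
  let markers : List Int := (PySem.List.pyRange 0 m 1).foldl
    (fun ms i => pvBApp1 (pvBApp0 ms (PySem.List.pyGetD a i none)) (PySem.List.pyGetD b i none)) []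
  let markers := (PySem.List.slice a (some m) none).foldl pvBApp0 markers   -- a[m:]
  let markers := (PySem.List.slice b (some m) none).foldl pvBApp1 markers   -- b[m:]
  ((markers.zip (markers.drop 1)).countP (fun pq => pq.1 != pq.2) : Int)

-- ===== PRECONDITION & SPEC =====
def Spec_calc_possessions_change (a : List (Option Int)) (b : List (Option Int)) (out : Int) : Prop := out = calc_possessions_change_alt a b
instance (a : List (Option Int)) (b : List (Option Int)) (out : Int) : Decidable (Spec_calc_possessions_change a b out) := by unfold Spec_calc_possessions_change; infer_instance

-- ===== CLAIM (what is proved, stated in full; the proofs are below) =====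
def Claim_equal_calc_possessions_change : Prop := ∀ (a : List (Option Int)) (b : List (Option Int)), Dom_calc_possessions_change a b → Spec_calc_possessions_change a b (calc_possessions_change a b)

-- ===== LEMMAS AND PROOFS =====

-- the marker-machine step (marker 0 = possession on a's side, 1 = b's side)
def pvStep (s : Int × Int) (mk : Int) : Int × Int :=
  if mk = 0 then (if s.1 = 1 then (0, s.2 + 1) else if s.1 = -1 then (0, s.2) else s)
  else (if s.1 = 0 then (1, s.2 + 1) else if s.1 = -1 then (1, s.2) else s)

-- the markers one element contributes
def pvMark (t : Int) (x : Option Int) : List Int :=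
  match x with
  | some v => if v > 0 then [t] else []
  | none => []

-- the full ordered marker list
def pvM (a : List (Option Int)) (b : List (Option Int)) : List Int :=
  ((a.zip b).flatMap (fun p => pvMark 0 p.1 ++ pvMark 1 p.2))
    ++ (a.drop (min a.length b.length)).flatMap (pvMark 0)
    ++ (b.drop (min a.length b.length)).flatMap (pvMark 1)

-- change count starting from previous marker p
def pvChg : Int → List Int → Int
  | _, [] => 0
  | p, x :: xs => (if x ≠ p then 1 else 0) + pvChg x xs

theorem pv_foldl_range_getD {σ : Type} (g : σ → Option Int → Option Int → σ) :
    ∀ (a b : List (Option Int)) (init : σ),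
    (List.range (min a.length b.length)).foldl
        (fun s k => g s (a.getD k none) (b.getD k none)) init
      = (a.zip b).foldl (fun s p => g s p.1 p.2) init := by
  intro a
  induction a with
  | nil => intro b init; simp
  | cons x xs ih =>
    intro b init
    cases b with
    | nil => simp
    | cons y ys =>
      have : min (x :: xs).length (y :: ys).length = min xs.length ys.length + 1 := by
        simp [Nat.succ_min_succ]
      rw [this, List.range_succ_eq_map, List.foldl_cons, List.foldl_map]
      simpa using ih ys (g init x y)

-- a fold over range(min(len a, len b)) reading a[i] and b[i] is a fold over zip a b
theorem pv_foldl_range_zip {σ : Type} (g : σ → Option Int → Option Int → σ)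
    (a b : List (Option Int)) (init : σ) :
    (PySem.List.pyRange 0 (min (PySem.List.len a) (PySem.List.len b)) 1).foldl
        (fun s i => g s (PySem.List.pyGetD a i none) (PySem.List.pyGetD b i none)) init
      = (a.zip b).foldl (fun s p => g s p.1 p.2) init := by
  have h1 : min (PySem.List.len a) (PySem.List.len b) = ((min a.length b.length : Nat) : Int) := by
    simp [PySem.List.len, Nat.cast_min]
  rw [h1, PySem.List.pyRange_zero_natCast, List.foldl_map]
  simp only [PySem.List.pyGetD_natCast]
  exact pv_foldl_range_getD g a b init

theorem pvAStep0_eq (s : Int × Int) (x : Option Int) :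
    pvAStep0 s x = (pvMark 0 x).foldl pvStep s := by
  cases x with
  | none => simp [pvAStep0, pvMark]
  | some v => by_cases hv : v > 0 <;> simp [pvAStep0, pvMark, hv, pvStep]

theorem pvAStep1_eq (s : Int × Int) (x : Option Int) :
    pvAStep1 s x = (pvMark 1 x).foldl pvStep s := by
  cases x with
  | none => simp [pvAStep1, pvMark]
  | some v => by_cases hv : v > 0 <;> simp [pvAStep1, pvMark, hv, pvStep]

theorem pvBApp0_eq (ms : List Int) (x : Option Int) :
    pvBApp0 ms x = ms ++ pvMark 0 x := by
  cases x with
  | none => simp [pvBApp0, pvMark]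
  | some v => by_cases hv : v > 0 <;> simp [pvBApp0, pvMark, hv]

theorem pvBApp1_eq (ms : List Int) (x : Option Int) :
    pvBApp1 ms x = ms ++ pvMark 1 x := by
  cases x with
  | none => simp [pvBApp1, pvMark]
  | some v => by_cases hv : v > 0 <;> simp [pvBApp1, pvMark, hv]

theorem pv_foldl_AStep0 (l : List (Option Int)) (s : Int × Int) :
    l.foldl pvAStep0 s = (l.flatMap (pvMark 0)).foldl pvStep s := by
  rw [List.foldl_flatMap]
  exact List.foldl_ext _ _ s (fun s x _ => pvAStep0_eq s x)

theorem pv_foldl_AStep1 (l : List (Option Int)) (s : Int × Int) :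
    l.foldl pvAStep1 s = (l.flatMap (pvMark 1)).foldl pvStep s := by
  rw [List.foldl_flatMap]
  exact List.foldl_ext _ _ s (fun s x _ => pvAStep1_eq s x)

-- A computes the marker-machine fold over the full marker list pvM
theorem pv_A_eq_fold (a b : List (Option Int)) :
    calc_possessions_change a b = ((pvM a b).foldl pvStep (-1, 0)).2 := by
  unfold calc_possessions_change
  have hrange2 : PySem.List.pyRange 0 2 1 = [0, 1] := by decide
  simp only [hrange2, List.foldl_cons, List.foldl_nil]
  have hone : ((1 : Int) = 0) = False := by simp
  simp only [hone, if_true, if_false]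
  rw [pv_foldl_range_zip (fun s x y => pvAStep1 (pvAStep0 s x) y) a b (-1, 0)]
  have hmain : (a.zip b).foldl (fun s p => pvAStep1 (pvAStep0 s p.1) p.2) (-1, 0)
      = ((a.zip b).flatMap (fun p => pvMark 0 p.1 ++ pvMark 1 p.2)).foldl pvStep (-1, 0) := by
    rw [List.foldl_flatMap]
    refine List.foldl_ext _ _ (-1, 0) (fun s p _ => ?_)
    rw [List.foldl_append, ← pvAStep0_eq, ← pvAStep1_eq]
  rw [hmain]
  set s1 := ((a.zip b).flatMap (fun p => pvMark 0 p.1 ++ pvMark 1 p.2)).foldl pvStep (-1, 0) with hs1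
  unfold pvM
  by_cases hba : PySem.List.len b > PySem.List.len a
  · have hlen : a.length < b.length := by
      simpa [PySem.List.len] using hba
    rw [if_pos hba]
    rw [PySem.List.foldl_pyRange_pyGetD b none pvAStep1 s1 (by simp [PySem.List.len])]
    have htoNat : (PySem.List.len a).toNat = a.length := by simp [PySem.List.len]
    have hmin : min a.length b.length = a.length := by omega
    rw [htoNat, pv_foldl_AStep1, hmin, List.drop_length]
    simp [List.foldl_append, hs1]
  · by_cases hab : PySem.List.len a > PySem.List.len b
    · have hlen : b.length < a.length := by
        simpa [PySem.List.len] using hab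
      rw [if_neg hba, if_pos hab]
      rw [PySem.List.foldl_pyRange_pyGetD a none pvAStep0 s1 (by simp [PySem.List.len])]
      have htoNat : (PySem.List.len b).toNat = b.length := by simp [PySem.List.len]
      have hmin : min a.length b.length = b.length := by omega
      rw [htoNat, pv_foldl_AStep0, hmin, List.drop_length]
      simp [List.foldl_append, hs1]
    · have hlen : a.length = b.length := by
        simp [PySem.List.len] at hba hab; omega
      rw [if_neg hba, if_neg hab]
      have hmin : min a.length b.length = a.length := by omega
      have hda : a.drop (min a.length b.length) = [] := by rw [hmin]; exact List.drop_length
      have hdb : b.drop (min a.length b.length) = [] := by rw [hmin, hlen]; exact List.drop_length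
      rw [hda, hdb]
      simp [hs1]

-- B builds exactly the marker list pvM and counts its adjacent unequal pairs
theorem pv_B_eq_count (a b : List (Option Int)) :
    calc_possessions_change_alt a b
      = (((pvM a b).zip ((pvM a b).drop 1)).countP (fun pq => pq.1 != pq.2) : Int) := by
  simp only [calc_possessions_change_alt]
  rw [pv_foldl_range_zip (fun ms x y => pvBApp1 (pvBApp0 ms x) y) a b []]
  have hmain : (a.zip b).foldl (fun ms p => pvBApp1 (pvBApp0 ms p.1) p.2) []
      = (a.zip b).flatMap (fun p => pvMark 0 p.1 ++ pvMark 1 p.2) := by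
    have : ∀ (l : List (Option Int × Option Int)) (acc : List Int),
        l.foldl (fun ms p => pvBApp1 (pvBApp0 ms p.1) p.2) acc
          = acc ++ l.flatMap (fun p => pvMark 0 p.1 ++ pvMark 1 p.2) := by
      intro l acc
      rw [← PySem.List.foldl_append_eq_flatMap]
      refine List.foldl_ext _ _ acc (fun ms p _ => ?_)
      rw [pvBApp0_eq, pvBApp1_eq, List.append_assoc]
    simpa using this (a.zip b) []
  rw [hmain]
  have hm0 : (0 : Int) ≤ min (PySem.List.len a) (PySem.List.len b) := by
    simp [PySem.List.len]
  have hmt : (min (PySem.List.len a) (PySem.List.len b)).toNat = min a.length b.length := by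
    simp [PySem.List.len]
    omega
  rw [PySem.List.slice_from a hm0, PySem.List.slice_from b hm0, hmt]
  have htail0 : ∀ (l : List (Option Int)) (acc : List Int),
      l.foldl pvBApp0 acc = acc ++ l.flatMap (pvMark 0) := by
    intro l acc
    rw [← PySem.List.foldl_append_eq_flatMap]
    exact List.foldl_ext _ _ acc (fun ms x _ => pvBApp0_eq ms x)
  have htail1 : ∀ (l : List (Option Int)) (acc : List Int),
      l.foldl pvBApp1 acc = acc ++ l.flatMap (pvMark 1) := by
    intro l acc
    rw [← PySem.List.foldl_append_eq_flatMap]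
    exact List.foldl_ext _ _ acc (fun ms x _ => pvBApp1_eq ms x)
  rw [htail0, htail1, pvM]

theorem pv_mem_mark {x t : Int} {y : Option Int} (h : x ∈ pvMark t y) : x = t := by
  cases y with
  | none => simp [pvMark] at h
  | some v =>
    by_cases hv : v > 0 <;> simp [pvMark, hv] at h
    exact h

theorem pv_mem_M (a b : List (Option Int)) : ∀ x ∈ pvM a b, x = 0 ∨ x = 1 := by
  intro x hx
  unfold pvM at hx
  simp only [List.mem_append, List.mem_flatMap] at hx
  rcases hx with (⟨p, _, hp | hp⟩ | ⟨y, _, hy⟩) | ⟨y, _, hy⟩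
  · exact Or.inl (pv_mem_mark hp)
  · exact Or.inr (pv_mem_mark hp)
  · exact Or.inl (pv_mem_mark hy)
  · exact Or.inr (pv_mem_mark hy)

theorem pv_fold_chg : ∀ (M : List Int) (p k : Int), (p = 0 ∨ p = 1) →
    (∀ x ∈ M, x = 0 ∨ x = 1) → (M.foldl pvStep (p, k)).2 = k + pvChg p M := by
  intro M
  induction M with
  | nil => intro p k _ _; simp [pvChg]
  | cons x xs ih =>
    intro p k hp hmem
    have hx : x = 0 ∨ x = 1 := hmem x (by simp)
    have hxs : ∀ y ∈ xs, y = 0 ∨ y = 1 := fun y hy => hmem y (List.mem_cons_of_mem _ hy)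
    have hstep : pvStep (p, k) x = (x, k + (if x ≠ p then 1 else 0)) := by
      rcases hp with hp | hp <;> rcases hx with hx | hx <;> subst hp <;> subst hx <;>
        norm_num [pvStep]
    rw [List.foldl_cons, hstep, ih x _ hx hxs]
    simp only [pvChg]
    ring

theorem pv_count_chg : ∀ (xs : List Int) (x : Int),
    ((((x :: xs).zip xs).countP (fun pq => pq.1 != pq.2) : Nat) : Int) = pvChg x xs := by
  intro xs
  induction xs with
  | nil => intro x; simp [pvChg]
  | cons y ys ih =>
    intro x
    simp only [List.zip_cons_cons, List.countP_cons, pvChg]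
    push_cast
    rw [← ih y]
    by_cases h : x = y
    · subst h
      simp
    · have h' : y ≠ x := fun hc => h hc.symm
      simp [h, h']
      ring

-- the machine's count from cur_direction = -1 is the adjacent-difference count
theorem pv_machine (M : List Int) (h : ∀ x ∈ M, x = 0 ∨ x = 1) :
    ((M.foldl pvStep (-1, 0)).2 : Int)
      = ((M.zip (M.drop 1)).countP (fun pq => pq.1 != pq.2) : Int) := by
  cases M with
  | nil => simp
  | cons x xs =>
    have hx : x = 0 ∨ x = 1 := h x (by simp)
    have hxs : ∀ y ∈ xs, y = 0 ∨ y = 1 := fun y hy => h y (List.mem_cons_of_mem _ hy)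
    have hstep : pvStep (-1, 0) x = (x, 0) := by
      rcases hx with hx | hx <;> subst hx <;> norm_num [pvStep]
    rw [List.foldl_cons, hstep, pv_fold_chg xs x 0 hx hxs]
    simp [pv_count_chg xs x]

-- ===== VERDICT (by name: the statement is the Claim_ definition above) =====
theorem calc_possessions_change_spec : Claim_equal_calc_possessions_change := by
  intro a b _
  unfold Spec_calc_possessions_change
  rw [pv_A_eq_fold, pv_B_eq_count]
  exact pv_machine (pvM a b) (pv_mem_M a b)
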